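-- pv_equiv track=rewrite | github.com/musaarfah/Codeforces | 69A.py | is_in_equilibrium
-- ===== SOURCE A (Python) =====
-- def is_in_equilibrium(n, forces):
--     sum_x = sum_y = sum_z = 0
--
--     for force in forces:
--         sum_x += force[0]
--         sum_y += force[1]
--         sum_z += force[2]
--
--     if sum_x == sum_y == sum_z == 0:
--         return "YES"
--     else:
--         return "NO"
-- ===== SOURCE B (Python) =====
-- def _vsum(forces, lo, hi):
--     # Divide-and-conquer vector sum of forces[lo:hi].
--     if hi - lo == 0:
--         return (0, 0, 0)
--     if hi - lo == 1:
--         f = forces[lo]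
--         return (f[0], f[1], f[2])
--     mid = (lo + hi) // 2
--     a = _vsum(forces, lo, mid)
--     b = _vsum(forces, mid, hi)
--     return (a[0] + b[0], a[1] + b[1], a[2] + b[2])
--
-- def is_in_equilibrium(n, forces):
--     return "YES" if _vsum(forces, 0, len(forces)) == (0, 0, 0) else "NO"
-- ===== Notes on version B (the rewrite author's own statement) =====
-- stated objective: alternative
-- what changed: Replaces A's single left-to-right loop with three running accumulators by a recursive divide-and-conquer that halves the index range, sums each half's force vector, and combines the two partial vectors; equilibrium is a single tuple comparison with (0,0,0). Correct because integer vector addition is associative, so any summation tree yields the same total.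
import Mathlib
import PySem

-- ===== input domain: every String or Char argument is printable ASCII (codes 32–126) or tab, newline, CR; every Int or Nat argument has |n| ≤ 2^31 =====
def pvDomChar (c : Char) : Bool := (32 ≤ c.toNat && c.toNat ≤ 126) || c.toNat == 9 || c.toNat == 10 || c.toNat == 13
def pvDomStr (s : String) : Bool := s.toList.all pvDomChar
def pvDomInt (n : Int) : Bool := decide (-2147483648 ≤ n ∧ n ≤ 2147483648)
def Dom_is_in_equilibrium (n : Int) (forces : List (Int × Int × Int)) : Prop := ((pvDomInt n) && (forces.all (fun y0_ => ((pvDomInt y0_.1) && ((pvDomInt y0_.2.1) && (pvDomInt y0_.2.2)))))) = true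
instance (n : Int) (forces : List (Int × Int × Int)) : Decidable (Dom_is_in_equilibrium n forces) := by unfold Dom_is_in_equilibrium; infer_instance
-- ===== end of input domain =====

-- B replaces A's single accumulator loop by a divide-and-conquer vector sum over index ranges (alternative decomposition, same cost).

-- ===== PORT A =====
-- A: one loop accumulating (sum_x, sum_y, sum_z) together, then a chained-equality test.
def is_in_equilibrium (n : Int) (forces : List (Int × Int × Int)) : String :=
  let s := forces.foldl (fun (acc : Int × Int × Int) force =>
      (acc.1 + force.1, acc.2.1 + force.2.1, acc.2.2 + force.2.2)) (0, 0, 0)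
  if s.1 = 0 ∧ s.2.1 = 0 ∧ s.2.2 = 0 then "YES" else "NO"

-- ===== PORT B =====
-- B: divide-and-conquer sum of the force vectors in forces[lo:hi].
-- (forces[lo]? is exact here: Source B only indexes with 0 ≤ lo < len(forces) in this branch.)
def pvVsum (forces : List (Int × Int × Int)) (lo hi : Nat) : Int × Int × Int :=
  if hi - lo = 0 then (0, 0, 0)
  else if hi - lo = 1 then
    match forces[lo]? with
    | some f => (f.1, f.2.1, f.2.2)
    | none => (0, 0, 0)
  else
    let mid := (lo + hi) / 2
    let a := pvVsum forces lo mid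
    let b := pvVsum forces mid hi
    (a.1 + b.1, a.2.1 + b.2.1, a.2.2 + b.2.2)
termination_by hi - lo
decreasing_by all_goals omega

def is_in_equilibrium_alt (n : Int) (forces : List (Int × Int × Int)) : String :=
  if pvVsum forces 0 forces.length = (0, 0, 0) then "YES" else "NO"

-- ===== PRECONDITION & SPEC =====
def Spec_is_in_equilibrium (n : Int) (forces : List (Int × Int × Int)) (out : String) : Prop := out = is_in_equilibrium_alt n forces
instance (n : Int) (forces : List (Int × Int × Int)) (out : String) : Decidable (Spec_is_in_equilibrium n forces out) := by unfold Spec_is_in_equilibrium; infer_instance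

-- ===== CLAIM (what is proved, stated in full; the proofs are below) =====
def Claim_equal_is_in_equilibrium : Prop := ∀ (n : Int) (forces : List (Int × Int × Int)), Dom_is_in_equilibrium n forces → Spec_is_in_equilibrium n forces (is_in_equilibrium n forces)

-- ===== LEMMAS AND PROOFS =====
def pvSums (l : List (Int × Int × Int)) : Int × Int × Int :=
  ((l.map (fun f => f.1)).sum, (l.map (fun f => f.2.1)).sum, (l.map (fun f => f.2.2)).sum)

theorem pv_fold_sums (forces : List (Int × Int × Int)) (a b c : Int) :
    forces.foldl (fun (acc : Int × Int × Int) force =>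
      (acc.1 + force.1, acc.2.1 + force.2.1, acc.2.2 + force.2.2)) (a, b, c)
    = (a + (forces.map (fun f => f.1)).sum,
       b + (forces.map (fun f => f.2.1)).sum,
       c + (forces.map (fun f => f.2.2)).sum) := by
  induction forces generalizing a b c with
  | nil => simp
  | cons h t ih => simp [List.foldl, ih]; omega

theorem pvSums_append (l₁ l₂ : List (Int × Int × Int)) :
    pvSums (l₁ ++ l₂)
      = ((pvSums l₁).1 + (pvSums l₂).1, (pvSums l₁).2.1 + (pvSums l₂).2.1,
         (pvSums l₁).2.2 + (pvSums l₂).2.2) := by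
  simp [pvSums]

theorem pvVsum_eq (forces : List (Int × Int × Int)) (lo hi : Nat)
    (hhi : hi ≤ forces.length) :
    pvVsum forces lo hi = pvSums ((forces.drop lo).take (hi - lo)) := by
  generalize hk : hi - lo = k
  induction k using Nat.strong_induction_on generalizing lo hi with
  | _ k ih =>
    subst hk
    rw [pvVsum]
    by_cases h0 : hi - lo = 0
    · simp [h0, pvSums]
    · by_cases h1 : hi - lo = 1
      · rw [if_neg h0, if_pos h1, h1]
        have hlo : lo < forces.length := by omega
        have hget : forces[lo]? = some forces[lo] := List.getElem?_eq_getElem hlo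
        have hd : forces.drop lo = forces[lo] :: forces.drop (lo + 1) :=
          List.drop_eq_getElem_cons hlo
        rw [hget, hd]
        have ht : (forces[lo] :: forces.drop (lo + 1)).take 1 = [forces[lo]] := rfl
        rw [ht]
        simp [pvSums]
      · rw [if_neg h0, if_neg h1]
        show ((pvVsum forces lo ((lo + hi) / 2)).1 + (pvVsum forces ((lo + hi) / 2) hi).1,
              (pvVsum forces lo ((lo + hi) / 2)).2.1 + (pvVsum forces ((lo + hi) / 2) hi).2.1,
              (pvVsum forces lo ((lo + hi) / 2)).2.2 + (pvVsum forces ((lo + hi) / 2) hi).2.2)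
            = pvSums (List.take (hi - lo) (List.drop lo forces))
        have hlm : lo < (lo + hi) / 2 := by omega
        have hmh : (lo + hi) / 2 < hi := by omega
        rw [ih ((lo + hi) / 2 - lo) (by omega) lo ((lo + hi) / 2) (by omega) rfl,
            ih (hi - (lo + hi) / 2) (by omega) ((lo + hi) / 2) hi hhi rfl]
        have hdd : forces.drop ((lo + hi) / 2)
            = (forces.drop lo).drop ((lo + hi) / 2 - lo) := by
          rw [List.drop_drop]; congr 1; omega
        have hsum : hi - lo = ((lo + hi) / 2 - lo) + (hi - (lo + hi) / 2) := by omega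
        rw [hdd, hsum, List.take_add, pvSums_append]

-- ===== VERDICT (by name: the statement is the Claim_ definition above) =====
theorem is_in_equilibrium_spec : Claim_equal_is_in_equilibrium := by
  intro n forces _
  unfold Spec_is_in_equilibrium is_in_equilibrium is_in_equilibrium_alt
  rw [pvVsum_eq forces 0 forces.length le_rfl]
  simp [pv_fold_sums, pvSums, Prod.ext_iff]
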